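-- pv_equiv track=rewrite | github.com/saikrishna1681/exam_website | exam_backend/exam/useful_functions.py | sort_marks
-- ===== SOURCE A (Python) =====
-- def sort_marks(marks_dict):
--     marks_list=[]
--     for i in marks_dict:
--         marks_list.append([i,marks_dict[i]])
--     marks_list.sort(key = lambda x :x[1],reverse=True)
--     mark_rank_list=[]
--     rank=0
--     marks=float('inf')
--     for i in marks_list:
--         if i[1]<marks:
--             marks=i[1]
--             rank=rank+1
--         mark_rank_list.append([i[0],i[1],rank])
--     return mark_rank_list
-- ===== SOURCE B (Python) =====
-- def sort_marks(marks_dict):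
--     pairs = sorted(marks_dict.items(), key=lambda kv: kv[1], reverse=True)
--     distinct = sorted({v for _, v in pairs}, reverse=True)
--     rank_of = {v: r for r, v in enumerate(distinct, 1)}
--     return [[k, v, rank_of[v]] for k, v in pairs]
-- ===== Notes on version B (the rewrite author's own statement) =====
-- stated objective: alternative
-- what changed: A's stateful inline ranking loop (running rank + last-mark sentinel initialised to float('inf')) is replaced by a stateless pass: build a rank table mapping each distinct mark, sorted descending, to its 1-based position, then emit [key, value, table[value]] for each sorted pair.
import Mathlib
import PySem

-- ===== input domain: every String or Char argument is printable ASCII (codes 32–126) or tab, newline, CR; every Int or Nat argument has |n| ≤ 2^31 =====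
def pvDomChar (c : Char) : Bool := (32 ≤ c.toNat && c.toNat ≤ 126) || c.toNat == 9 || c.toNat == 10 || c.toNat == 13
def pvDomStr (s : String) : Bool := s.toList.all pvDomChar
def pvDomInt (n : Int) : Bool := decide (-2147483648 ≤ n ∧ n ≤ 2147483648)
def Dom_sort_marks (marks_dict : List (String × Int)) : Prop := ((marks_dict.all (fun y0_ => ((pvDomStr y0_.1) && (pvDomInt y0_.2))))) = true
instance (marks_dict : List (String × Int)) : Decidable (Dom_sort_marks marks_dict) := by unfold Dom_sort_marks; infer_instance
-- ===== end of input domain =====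

-- B replaces A's stateful rank/last-mark ranking loop by a rank table built from the sorted
-- distinct marks plus a lookup pass (objective: alternative decomposition, same asymptotic cost).

-- ===== PORT A =====
-- Python's 'marks = float('inf')' sentinel is modelled as 'none' (no Int value ever fails 'v < inf',
-- and after the first update marks is always the Int of a previous element) — exact on Int marks.
def pyLtInf (v : Int) (marks : Option Int) : Bool :=
  match marks with
  | none => true            -- v < float('inf') is always true
  | some m => decide (v < m)

-- the 'for i in marks_list' loop carrying (rank, marks)
def sortMarksLoop : List (String × Int) → Int → Option Int → List (String × Int × Int)
  | [], _, _ => []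
  | i :: t, rank, marks =>
    if pyLtInf i.2 marks then
      (i.1, i.2, rank + 1) :: sortMarksLoop t (rank + 1) (some i.2)
    else
      (i.1, i.2, rank) :: sortMarksLoop t rank marks

def sort_marks (marks_dict : List (String × Int)) : List (String × Int × Int) :=
  -- for i in marks_dict: marks_list.append([i, marks_dict[i]])  (keys in insertion order, then lookup;
  -- the default 0 of getD is never used: every k is a key of the dict)
  let d := PySem.Dict.mk marks_dict
  let marks_list := d.keys.map (fun k => (k, d.getD k 0))
  let sortedL := PySem.List.sorted marks_list (fun x => x.2) true   -- .sort(key=lambda x: x[1], reverse=True)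
  sortMarksLoop sortedL 0 none

-- ===== PORT B =====
def sort_marks_alt (marks_dict : List (String × Int)) : List (String × Int × Int) :=
  let pairs := PySem.List.sorted marks_dict (fun kv => kv.2) true          -- sorted(items, key=…, reverse=True)
  let distinct := PySem.List.sorted (PySem.Set.ofList (pairs.map Prod.snd)) (fun v => v) true  -- sorted({v…}, reverse=True)
  let rank_of := (PySem.List.enumerate distinct 1).foldl (fun d p => d.insert p.2 p.1) PySem.Dict.empty
  pairs.map (fun kv => (kv.1, kv.2, rank_of.getD kv.2 0))                  -- rank_of[v] always hits: v ∈ distinct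

-- ===== PRECONDITION & SPEC =====
-- The argument is a Python dict, whose keys are necessarily distinct; an association list with a
-- duplicated key represents no dict input, so Pre_ excludes no input the Python A ever receives.
def Pre_sort_marks (marks_dict : List (String × Int)) : Prop := (marks_dict.map Prod.fst).Nodup
instance (marks_dict : List (String × Int)) : Decidable (Pre_sort_marks marks_dict) := by unfold Pre_sort_marks; infer_instance
def pvWitness_sort_marks : (List (String × Int)) := [("alice", 7), ("bob", 3), ("carol", 7)]

def Spec_sort_marks (marks_dict : List (String × Int)) (out : List (String × Int × Int)) : Prop := out = sort_marks_alt marks_dict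
instance (marks_dict : List (String × Int)) (out : List (String × Int × Int)) : Decidable (Spec_sort_marks marks_dict out) := by unfold Spec_sort_marks; infer_instance

-- ===== CLAIM (what is proved, stated in full; the proofs are below) =====
def Claim_equal_sort_marks : Prop := ∀ (marks_dict : List (String × Int)), Dom_sort_marks marks_dict → Pre_sort_marks marks_dict → Spec_sort_marks marks_dict (sort_marks marks_dict)

-- ===== LEMMAS AND PROOFS =====

-- the dense rank of v: number of marks ≥ v among the distinct marks D
def rkOf (D : List Int) (v : Int) : Int := ((D.filter (fun x => decide (v ≤ x))).length : Int)

-- 'm ≤ x' against the optional sentinel (false for the infinite initial sentinel)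
def oleB (marks : Option Int) (x : Int) : Bool :=
  match marks with
  | none => false
  | some m => decide (m ≤ x)

theorem filter_split {α : Type} (D : List α) (p q : α → Bool)
    (h : ∀ x ∈ D, q x = true → p x = true) :
    (D.filter p).length = (D.filter q).length + (D.filter (fun x => p x && !q x)).length := by
  induction D with
  | nil => simp
  | cons d t ih =>
    have hd := h d (by simp)
    have ht : ∀ x ∈ t, q x = true → p x = true := fun x hx => h x (by simp [hx])
    by_cases hq : q d = true
    · simp [hq, h d (by simp) hq, ih ht]; omega
    · by_cases hp : p d = true <;> simp [hq, hp, ih ht] <;> omega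

theorem filter_eq_singleton {α : Type} [DecidableEq α] (D : List α) (p : α → Bool) (v : α)
    (hN : D.Nodup) (hv : v ∈ D) (hp : p v = true) (huniq : ∀ x ∈ D, p x = true → x = v) :
    D.filter p = [v] := by
  induction D with
  | nil => cases hv
  | cons d t ih =>
    rcases List.mem_cons.mp hv with rfl | hvt
    · have ht : t.filter p = [] := by
        apply List.filter_eq_nil_iff.mpr
        intro x hx hpx
        exact absurd (huniq x (by simp [hx]) hpx ▸ hx) (List.nodup_cons.mp hN).1
      simp [hp, ht]
    · have hdv : d ≠ v := fun h => (List.nodup_cons.mp hN).1 (h ▸ hvt)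
      have hpd : p d = false := by
        by_contra h
        exact hdv (huniq d (by simp) (by simpa using h))
      simp [hpd,
        ih (List.nodup_cons.mp hN).2 hvt (fun x hx => huniq x (by simp [hx]))]

-- the main loop invariant: on a non-increasing list whose values come from the distinct set D,
-- A's running rank is exactly the dense rank rkOf D
theorem loop_eq_map (D : List Int) (hD : D.Pairwise (· > ·)) :
    ∀ (l : List (String × Int)), l.Pairwise (fun a b => b.2 ≤ a.2) →
    ∀ (marks : Option Int) (r : Int),
      r = ((D.filter (oleB marks)).length : Int) →
      (∀ p ∈ l, p.2 ∈ D) →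
      (∀ x ∈ D, oleB marks x = true ∨ x ∈ l.map Prod.snd) →
      (∀ p ∈ l, oleB marks p.2 = false ∨ marks = some p.2) →
      sortMarksLoop l r marks = l.map (fun p => (p.1, p.2, rkOf D p.2)) := by
  have hDnd : D.Nodup := hD.imp (fun h => ne_of_gt h)
  intro l
  induction l with
  | nil => intro _ marks r _ _ _ _; simp [sortMarksLoop]
  | cons p t ih =>
    intro hl marks r hr hmem hcov hle
    have hvD : p.2 ∈ D := hmem p (by simp)
    have htle : ∀ q ∈ t, q.2 ≤ p.2 := fun q hq => (List.pairwise_cons.mp hl).1 q hq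
    by_cases hlt : pyLtInf p.2 marks = true
    · -- the mark drops (or is the first): rank increments
      have holev : oleB marks p.2 = false := by
        cases marks with
        | none => rfl
        | some m => simp [pyLtInf] at hlt; simp [oleB]; omega
      have hltm : ∀ x, oleB marks x = true → p.2 < x := by
        intro x hx
        cases marks with
        | none => simp [oleB] at hx
        | some m =>
          simp [oleB] at hx
          simp [pyLtInf] at hlt
          omega
      -- r + 1 = rkOf D p.2
      have hsplit := filter_split D (fun x => decide (p.2 ≤ x)) (oleB marks)
        (fun x _ hx => by simpa using le_of_lt (hltm x hx))
      have hone : D.filter (fun x => decide (p.2 ≤ x) && !(oleB marks x)) = [p.2] := by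
        apply filter_eq_singleton D _ p.2 hDnd hvD
        · simp [holev]
        · intro x hxD hx
          simp only [Bool.and_eq_true, Bool.not_eq_true', decide_eq_true_eq] at hx
          rcases hcov x hxD with h | h
          · rw [h] at hx; exact absurd hx.2 (by simp)
          · rcases List.mem_map.mp h with ⟨q, hq, rfl⟩
            rcases List.mem_cons.mp hq with rfl | hq'
            · rfl
            · exact le_antisymm (htle q hq') hx.1
      have hrk : r + 1 = rkOf D p.2 := by
        rw [hr, rkOf, hsplit, hone]
        push_cast
        simp
      have hrec : sortMarksLoop t (r + 1) (some p.2) =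
          t.map (fun q => (q.1, q.2, rkOf D q.2)) := by
        apply ih (List.pairwise_cons.mp hl).2 (some p.2) (r + 1)
        · rw [hrk, rkOf]; rfl
        · exact fun q hq => hmem q (by simp [hq])
        · intro x hxD
          rcases hcov x hxD with h | h
          · exact Or.inl (by simp [oleB]; exact le_of_lt (hltm x h))
          · rcases List.mem_map.mp h with ⟨q, hq, rfl⟩
            rcases List.mem_cons.mp hq with rfl | hq'
            · exact Or.inl (by simp [oleB])
            · exact Or.inr (List.mem_map.mpr ⟨q, hq', rfl⟩)
        · intro q hq
          rcases eq_or_lt_of_le (htle q hq) with h | h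
          · exact Or.inr (by rw [h])
          · exact Or.inl (by simp [oleB]; omega)
      simp [sortMarksLoop, hlt, hrk]
      rw [← hrk, hrec]
    · -- tied mark: marks = some p.2 and the rank repeats
      have hms : marks = some p.2 := by
        rcases hle p (by simp) with h | h
        · cases marks with
          | none => simp [pyLtInf] at hlt
          | some m =>
            simp [pyLtInf] at hlt
            simp [oleB] at h
            omega
        · exact h
      have hrk : r = rkOf D p.2 := by rw [hr, hms, rkOf]; rfl
      have hrec : sortMarksLoop t r marks = t.map (fun q => (q.1, q.2, rkOf D q.2)) := by
        apply ih (List.pairwise_cons.mp hl).2 marks r hr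
        · exact fun q hq => hmem q (by simp [hq])
        · intro x hxD
          rcases hcov x hxD with h | h
          · exact Or.inl h
          · rcases List.mem_map.mp h with ⟨q, hq, rfl⟩
            rcases List.mem_cons.mp hq with rfl | hq'
            · exact Or.inl (by rw [hms]; simp [oleB])
            · exact Or.inr (List.mem_map.mpr ⟨q, hq', rfl⟩)
        · intro q hq
          rcases eq_or_lt_of_le (htle q hq) with h | h
          · exact Or.inr (by rw [hms, h])
          · exact Or.inl (by rw [hms]; simp [oleB]; omega)
      simp [sortMarksLoop, hlt, hrk]
      rw [← hrk, hrec]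

-- B's table lookup: getD of the enumerate/insert fold is the 1-based position
theorem getD_preserved (l : List (Int × Int)) (d0 : PySem.Dict Int Int) (v : Int)
    (h : ∀ p ∈ l, p.2 ≠ v) :
    (l.foldl (fun d p => d.insert p.2 p.1) d0).getD v 0 = d0.getD v 0 := by
  induction l generalizing d0 with
  | nil => rfl
  | cons q l ih =>
    simp only [List.foldl_cons]
    rw [ih _ (fun p hp => h p (by simp [hp])),
      PySem.Dict.getD_insert_of_ne d0 q.1 0 (Ne.symm (h q (by simp)))]

theorem getD_enum_fold (D : List Int) (hN : D.Nodup) :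
    ∀ (s : Int) (d0 : PySem.Dict Int Int) (v : Int), v ∈ D →
    ((PySem.List.enumerate D s).foldl (fun d p => d.insert p.2 p.1) d0).getD v 0
      = s + (D.idxOf v : Int) := by
  induction D with
  | nil => intro _ _ _ h; cases h
  | cons x t ih =>
    intro s d0 v hv
    rw [PySem.List.enumerate_cons]
    simp only [List.foldl_cons]
    rcases List.mem_cons.mp hv with rfl | hvt
    · rw [getD_preserved _ _ _ (by
        intro p hp
        rcases (PySem.List.mem_enumerate_iff _ _ _).mp hp with ⟨k, hk, rfl⟩
        exact fun h => (List.nodup_cons.mp hN).1 (h ▸ List.getElem_mem hk)),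
        PySem.Dict.getD_insert_self]
      simp
    · have hne : v ≠ x := fun h => (List.nodup_cons.mp hN).1 (h ▸ hvt)
      rw [ih (List.nodup_cons.mp hN).2 (s + 1) _ v hvt, List.idxOf_cons_ne _ (fun h => hne h.symm)]
      push_cast; ring

-- on a strictly descending list, 1-based position = rkOf
theorem idxOf_rk (D : List Int) (hD : D.Pairwise (· > ·)) (v : Int) (hv : v ∈ D) :
    1 + (D.idxOf v : Int) = rkOf D v := by
  induction D with
  | nil => cases hv
  | cons d t ih =>
    have hdt : ∀ x ∈ t, x < d := (List.pairwise_cons.mp hD).1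
    rcases List.mem_cons.mp hv with rfl | hvt
    · have hnil : t.filter (fun x => decide (v ≤ x)) = [] :=
        List.filter_eq_nil_iff.mpr (fun x hx => by simpa using hdt x hx)
      simp [rkOf, hnil]
    · have hvd : v < d := hdt v hvt
      have hne : v ≠ d := ne_of_lt hvd
      rw [List.idxOf_cons_ne _ (fun h => hne h.symm)]
      have := ih (List.pairwise_cons.mp hD).2 hvt
      simp only [rkOf, List.filter_cons, decide_eq_true_eq] at this ⊢
      rw [if_pos (le_of_lt hvd)]
      simp only [List.length_cons, Nat.succ_eq_add_one]
      push_cast at this ⊢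
      omega

-- under distinct keys, A's rebuilt [key, value] list is the dict's items themselves
theorem marks_list_eq (marks_dict : List (String × Int)) (hpre : (marks_dict.map Prod.fst).Nodup) :
    (PySem.Dict.mk marks_dict).keys.map (fun k => (k, (PySem.Dict.mk marks_dict).getD k 0))
      = marks_dict := by
  have hkeys : (PySem.Dict.mk marks_dict).keys = marks_dict.map Prod.fst := rfl
  rw [hkeys, List.map_map]
  conv_rhs => rw [← List.map_id marks_dict]
  apply List.map_congr_left
  intro p hp
  simp only [Function.comp_apply, id]
  rw [PySem.Dict.getD_of_mem_items { items := marks_dict } (k := p.1) (v := p.2)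
    (by simpa using hp) hpre 0]

-- ===== VERDICT (by name: the statement is the Claim_ definition above) =====
theorem sort_marks_spec : Claim_equal_sort_marks := by
  intro marks_dict _hdom hpre
  simp only [Spec_sort_marks, sort_marks, sort_marks_alt]
  rw [marks_list_eq marks_dict hpre]
  set L := PySem.List.sorted marks_dict (fun kv => kv.2) true with hL
  set D := PySem.List.sorted (PySem.Set.ofList (L.map Prod.snd)) (fun v => v) true with hDdef
  have hDperm : D.Perm (PySem.Set.ofList (L.map Prod.snd)) := PySem.List.sorted_perm _ _ _
  have hDnodup : D.Nodup := hDperm.nodup_iff.mpr (PySem.Set.nodup_ofList _)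
  have hD : D.Pairwise (· > ·) := by
    have h1 : D.Pairwise (fun a b => b ≤ a) := PySem.List.sorted_pairwise_rev _ _
    have h2 : D.Pairwise (· ≠ ·) := hDnodup
    exact (h1.and h2).imp (fun h => lt_of_le_of_ne h.1 (Ne.symm h.2))
  have hmemD : ∀ v, v ∈ L.map Prod.snd → v ∈ D := by
    intro v hv
    rw [hDdef, PySem.List.mem_sorted]
    exact (PySem.Set.mem_ofList _ _).mpr hv
  rw [loop_eq_map D hD L (PySem.List.sorted_pairwise_rev _ _) none 0 (by
      have h0 : D.filter (oleB none) = [] :=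
        List.filter_eq_nil_iff.mpr (fun x _ => by simp [oleB])
      rw [h0]; rfl)
    (fun p hp => hmemD p.2 (List.mem_map.mpr ⟨p, hp, rfl⟩))
    (fun x hxD => Or.inr (by
      have := (PySem.Set.mem_ofList (L.map Prod.snd) x).mp (by
        rw [hDdef] at hxD; exact (PySem.List.mem_sorted _ _ _ _).mp hxD)
      exact this))
    (fun p _ => Or.inl rfl)]
  apply List.map_congr_left
  intro p hp
  have hvD : p.2 ∈ D := hmemD p.2 (List.mem_map.mpr ⟨p, hp, rfl⟩)
  rw [getD_enum_fold D hDnodup 1 _ p.2 hvD, idxOf_rk D hD p.2 hvD]
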